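-- pv_equiv track=rewrite | github.com/Oliver-Akins/AdventOfCode | day_5/part_2.py | binary_partition
-- ===== SOURCE A (Python) =====
-- def binary_partition(instructions, area, lesser):
-- 	# Base Case: no instructions remaining
-- 	if len(instructions) == 0:
-- 		if instructions == lesser:
-- 			return area[0]
-- 		else:
-- 			return area[1]
--
-- 	# Recursive Case: Multiple instructions remaining
-- 	mid = ((area[1] - area[0]) // 2) + area[0]
-- 	if instructions[0] == lesser:
-- 		return binary_partition(instructions[1:], [area[0], mid], lesser)
-- 	else:
-- 		return binary_partition(instructions[1:], [mid, area[1]], lesser)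
-- ===== SOURCE B (Python) =====
-- def binary_partition(instructions, area, lesser):
-- 	lo, hi = area[0], area[1]
-- 	for ch in instructions:
-- 		mid = (hi - lo) // 2 + lo
-- 		if ch == lesser:
-- 			hi = mid
-- 		else:
-- 			lo = mid
-- 	return hi
-- ===== Notes on version B (the rewrite author's own statement) =====
-- stated objective: simpler
-- what changed: Replaces the recursion that rebuilds a fresh two-element list each step with a single iterative pass maintaining only the two integer bounds lo/hi and returning the upper bound (no per-step list allocation or call frame; A hits Python's recursion limit on long inputs); Pre_ excludes areas with fewer than two elements, on which A raises IndexError (except the degenerate corner instructions == '' == lesser with a one-element area, where B still raises).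
-- intended difference: When lesser is the empty string (a degenerate marker) and area[0] != area[1], A's base case accidentally matches the exhausted instruction string and returns the lower bound of the final interval, while B returns its upper bound — the value A returns for every ordinary non-empty marker, which is the intended partition result. — e.g. on binary_partition("F", [0, 8], ""): A returns 4, B returns 8
-- outside the precondition, e.g. on binary_partition('', [5], ''): A returns 5, B raises IndexError
import Mathlib
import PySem

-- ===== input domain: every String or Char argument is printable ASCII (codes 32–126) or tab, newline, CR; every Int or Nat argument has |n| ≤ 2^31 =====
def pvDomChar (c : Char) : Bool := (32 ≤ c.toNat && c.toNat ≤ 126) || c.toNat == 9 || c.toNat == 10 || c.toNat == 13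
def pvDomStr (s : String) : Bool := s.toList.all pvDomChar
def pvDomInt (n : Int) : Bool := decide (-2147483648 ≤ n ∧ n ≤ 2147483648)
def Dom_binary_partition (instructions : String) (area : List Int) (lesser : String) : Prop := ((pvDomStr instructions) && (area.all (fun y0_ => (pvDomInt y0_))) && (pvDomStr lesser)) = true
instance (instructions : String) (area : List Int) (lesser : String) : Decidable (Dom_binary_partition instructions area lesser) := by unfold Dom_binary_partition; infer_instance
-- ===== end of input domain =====

-- B replaces A's recursion (which rebuilds a two-element list each step) by one iterative pass over
-- two integer bounds, returning the upper bound; same value wherever A returns the intended one.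


-- ===== PORT A =====
-- A's recursion, on the instruction characters; area[0]/area[1] are pyGet? (none = IndexError,
-- excluded by Pre_; .getD 0 totalises). The base case compares the (empty) remaining instruction
-- string with `lesser`, exactly as A does.
def binPartA : List Char → List Int → String → Int
  | [], area, lesser =>
      if String.mk [] = lesser then (PySem.List.pyGet? area 0).getD 0
      else (PySem.List.pyGet? area 1).getD 0
  | c :: cs, area, lesser =>
      let a0 := (PySem.List.pyGet? area 0).getD 0
      let a1 := (PySem.List.pyGet? area 1).getD 0
      let mid := PySem.Int.floordiv (a1 - a0) 2 + a0
      if String.mk [c] = lesser then binPartA cs [a0, mid] lesser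
      else binPartA cs [mid, a1] lesser

def binary_partition (instructions : String) (area : List Int) (lesser : String) : Int :=
  binPartA instructions.toList area lesser

-- ===== PORT B =====
-- B's single pass: fold over the characters maintaining (lo, hi), return the upper bound.
def binary_partition_alt (instructions : String) (area : List Int) (lesser : String) : Int :=
  let lo := (PySem.List.pyGet? area 0).getD 0
  let hi := (PySem.List.pyGet? area 1).getD 0
  (instructions.toList.foldl
    (fun (p : Int × Int) ch =>
      let mid := PySem.Int.floordiv (p.2 - p.1) 2 + p.1
      if String.mk [ch] = lesser then (p.1, mid) else (mid, p.2)) (lo, hi)).2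

-- ===== PRECONDITION & SPEC =====
-- Pre_ excludes area with fewer than two elements: there A raises IndexError except in the single
-- corner instructions = "" = lesser with a one-element area (where A returns area[0]); B's
-- iterative form reads area[1] up front and raises there too.
def Pre_binary_partition (instructions : String) (area : List Int) (lesser : String) : Prop :=
  2 ≤ area.length
instance (instructions : String) (area : List Int) (lesser : String) : Decidable (Pre_binary_partition instructions area lesser) := by unfold Pre_binary_partition; infer_instance
def pvWitness_binary_partition : String × List Int × String := ("FBF", [0, 8], "F")

-- When lesser is the empty string (a degenerate marker no real call uses) and area[0] ≠ area[1],
-- A's base case accidentally compares the exhausted instruction string with lesser and returns the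
-- lower bound of the final interval, while B returns its upper bound — the value A itself returns
-- on every ordinary (non-empty) marker, which is the intended result of the partition.
def D_binary_partition (instructions : String) (area : List Int) (lesser : String) : Prop :=
  lesser = "" ∧ area.getD 0 0 ≠ area.getD 1 0
instance (instructions : String) (area : List Int) (lesser : String) : Decidable (D_binary_partition instructions area lesser) := by unfold D_binary_partition; infer_instance

def Spec_binary_partition (instructions : String) (area : List Int) (lesser : String) (out : Int) : Prop := ¬ D_binary_partition instructions area lesser → out = binary_partition_alt instructions area lesser
instance (instructions : String) (area : List Int) (lesser : String) (out : Int) : Decidable (Spec_binary_partition instructions area lesser out) := by unfold Spec_binary_partition; infer_instance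

def pvDiffWitness_binary_partition : String × List Int × String := ("F", [0, 8], "")
def pvDiffWitnessOut_binary_partition : Int × Int := (4, 8)

-- ===== CLAIM (what is proved, stated in full; the proofs are below) =====
def Claim_unchanged_binary_partition : Prop := ∀ (instructions : String) (area : List Int) (lesser : String), Dom_binary_partition instructions area lesser → Pre_binary_partition instructions area lesser → Spec_binary_partition instructions area lesser (binary_partition instructions area lesser)
def Claim_changed_binary_partition : Prop := Dom_binary_partition (pvDiffWitness_binary_partition.1) (pvDiffWitness_binary_partition.2.1) (pvDiffWitness_binary_partition.2.2) ∧ Pre_binary_partition (pvDiffWitness_binary_partition.1) (pvDiffWitness_binary_partition.2.1) (pvDiffWitness_binary_partition.2.2) ∧ D_binary_partition (pvDiffWitness_binary_partition.1) (pvDiffWitness_binary_partition.2.1) (pvDiffWitness_binary_partition.2.2) ∧ binary_partition (pvDiffWitness_binary_partition.1) (pvDiffWitness_binary_partition.2.1) (pvDiffWitness_binary_partition.2.2) = pvDiffWitnessOut_binary_partition.1 ∧ binary_partition_alt (pvDiffWitness_binary_partition.1) (pvDiffWitness_binary_partition.2.1) (pvDiffWitness_binary_partition.2.2) = pvDiffWitnessOut_binary_partition.2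 ∧ pvDiffWitnessOut_binary_partition.1 ≠ pvDiffWitnessOut_binary_partition.2

-- ===== LEMMAS AND PROOFS =====

-- Evaluate Python's area[0] / area[1] on a list with at least two elements.
theorem pyGet0_cons (lo hi : Int) (rest : List Int) :
    (PySem.List.pyGet? (lo :: hi :: rest) 0).getD 0 = lo := by
  simp [PySem.List.pyGet?, PySem.List.pyIdx?, show (0:Int) ≤ (rest.length:Int)+1 by positivity]

theorem pyGet1_cons (lo hi : Int) (rest : List Int) :
    (PySem.List.pyGet? (lo :: hi :: rest) 1).getD 0 = hi := by
  simp [PySem.List.pyGet?, PySem.List.pyIdx?]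

-- Core invariant: on a list whose first two elements are lo, hi, A's recursion equals B's fold,
-- up to A's base-case choice of projection.
theorem binPartA_eq_fold (cs : List Char) (lesser : String) :
    ∀ (lo hi : Int) (rest : List Int),
    binPartA cs (lo :: hi :: rest) lesser =
      (let p := cs.foldl
        (fun (p : Int × Int) ch =>
          let mid := PySem.Int.floordiv (p.2 - p.1) 2 + p.1
          if String.mk [ch] = lesser then (p.1, mid) else (mid, p.2)) (lo, hi)
       if lesser = "" then p.1 else p.2) := by
  induction cs with
  | nil =>
      intro lo hi rest
      simp only [binPartA, List.foldl_nil, pyGet0_cons, pyGet1_cons]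
      by_cases h : lesser = ""
      · simp [h, show String.mk ([] : List Char) = "" by decide]
      · simp [h, eq_comm, show String.mk ([] : List Char) = "" by decide]
  | cons c cs ih =>
      intro lo hi rest
      simp only [binPartA, List.foldl_cons, pyGet0_cons, pyGet1_cons]
      by_cases hc : String.mk [c] = lesser
      · simp only [if_pos hc]
        exact ih lo (PySem.Int.floordiv (hi - lo) 2 + lo) []
      · simp only [if_neg hc]
        exact ih (PySem.Int.floordiv (hi - lo) 2 + lo) hi []

-- When the two bounds coincide, the fold keeps them fixed at that common value.
theorem fold_const (cs : List Char) (lesser : String) (v : Int) :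
    cs.foldl
      (fun (p : Int × Int) ch =>
        let mid := PySem.Int.floordiv (p.2 - p.1) 2 + p.1
        if String.mk [ch] = lesser then (p.1, mid) else (mid, p.2)) (v, v) = (v, v) := by
  induction cs with
  | nil => rfl
  | cons c cs ih =>
      simp only [List.foldl_cons, sub_self,
        show PySem.Int.floordiv 0 2 = 0 by decide, zero_add]
      split <;> exact ih

-- ===== VERDICT (by name: the statement is the Claim_ definition above) =====
theorem binary_partition_spec : Claim_unchanged_binary_partition := by
  intro instructions area lesser _hDom hPre hD
  unfold Pre_binary_partition at hPre
  match area, hPre with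
  | lo :: hi :: rest, _ =>
    unfold D_binary_partition at hD
    simp only [List.getD_cons_zero, List.getD_cons_succ] at hD
    unfold binary_partition binary_partition_alt
    simp only [pyGet0_cons, pyGet1_cons]
    rw [binPartA_eq_fold instructions.toList lesser lo hi rest]
    by_cases h : lesser = ""
    · have hv : lo = hi := by
        by_contra hne; exact hD ⟨h, hne⟩
      subst hv
      rw [h, if_pos rfl, fold_const]
    · simp [h]

theorem binary_partition_changed : Claim_changed_binary_partition := by
  unfold Claim_changed_binary_partition; decide
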